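-- pv_equiv track=rewrite | github.com/mattw23n/wayfinders | backend/main.py | parse_llm_explanations
-- ===== SOURCE A (Python) =====
-- def parse_llm_explanations(llm_response: str, num_routes: int) -> list:
--     """Parse LLM response into individual route explanations"""
--     explanations = []
--     lines = llm_response.strip().split('\n')
--
--     for i in range(1, num_routes + 1):
--         # Look for "Route X:" pattern
--         route_pattern = f"Route {i}:"
--         explanation = None
--
--         for line in lines:
--             if line.strip().startswith(route_pattern):
--                 # Extract everything after "Route X:"
--                 explanation = line.split(route_pattern, 1)[1].strip()
--                 break
--
--         # Fallback if parsing fails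
--         if not explanation:
--             if i == 1:
--                 explanation = "Recommended route with lowest crowdedness."
--             else:
--                 explanation = "Alternative route option."
--
--         explanations.append(explanation)
--
--     return explanations
-- ===== SOURCE B (Python) =====
-- def parse_llm_explanations(llm_response: str, num_routes: int) -> list:
--     """Parse LLM response into individual route explanations (single pass)."""
--     found = {}
--     for line in llm_response.strip().split('\n'):
--         s = line.strip()
--         if s.startswith("Route "):
--             rest = s[6:]
--             colon = rest.find(':')
--             if colon != -1:
--                 key = rest[:colon]
--                 if key not in found:
--                     found[key] = rest[colon + 1:].strip()
--     out = []
--     for i in range(1, num_routes + 1):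
--         e = found.get(str(i))
--         if not e:
--             e = ("Recommended route with lowest crowdedness." if i == 1
--                  else "Alternative route option.")
--         out.append(e)
--     return out
-- ===== Notes on version B (the rewrite author's own statement) =====
-- stated objective: faster
-- what changed: Instead of rescanning all lines for each route (nested loops), B makes one pass over the lines building a dict from route-number key to the first explanation seen, then answers each route by a single dict lookup with the same fallbacks.
import Mathlib
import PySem

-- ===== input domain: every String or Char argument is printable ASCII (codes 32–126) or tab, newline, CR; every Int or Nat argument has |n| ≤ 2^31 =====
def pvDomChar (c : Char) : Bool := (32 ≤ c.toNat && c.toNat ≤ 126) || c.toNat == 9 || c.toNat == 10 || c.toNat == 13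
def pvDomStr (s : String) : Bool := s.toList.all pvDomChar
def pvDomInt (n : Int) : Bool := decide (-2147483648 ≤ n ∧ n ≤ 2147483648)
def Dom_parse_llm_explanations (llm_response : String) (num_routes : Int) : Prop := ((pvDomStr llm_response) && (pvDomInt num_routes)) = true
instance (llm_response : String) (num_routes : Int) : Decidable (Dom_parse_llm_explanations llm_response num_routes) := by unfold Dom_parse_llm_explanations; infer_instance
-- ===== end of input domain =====

-- B replaces A's per-route rescan of all lines by ONE pass over the lines building a
-- route-key → first-explanation dict, then a constant-time lookup per route (objective: faster).


-- ===== PORT A =====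
-- inner `for line in lines: … break` loop of A, for one pattern "Route {i}:"
def pvScanA (lines : List String) (pat : String) : Option String :=
  match lines with
  | [] => none
  | line :: rest =>
      if PySem.Str.startswith (PySem.Str.strip line) pat then
        -- line.split(pat, 1)[1].strip(); under the guard pat occurs in line, so the getD defaults are unreachable
        some (PySem.Str.strip ((PySem.List.pyGet? ((PySem.Str.splitMax? line pat 1).getD []) 1).getD ""))
      else pvScanA rest pat

-- `if not explanation: …` (fires on None and on "")
def pvFallbackA (i : Int) (e : Option String) : String :=
  match e with
  | some s => if s = "" then (if i = 1 then "Recommended route with lowest crowdedness." else "Alternative route option.") else s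
  | none => if i = 1 then "Recommended route with lowest crowdedness." else "Alternative route option."

def parse_llm_explanations (llm_response : String) (num_routes : Int) : List String :=
  let lines := (PySem.Str.split? (PySem.Str.strip llm_response) "\n").getD []   -- sep "\n" ≠ "", getD unreachable
  (PySem.List.pyRange 1 (num_routes + 1) 1).foldl
    (fun acc i => acc ++ [pvFallbackA i (pvScanA lines ("Route " ++ PySem.Int.toStr i ++ ":"))]) []

-- ===== PORT B =====
-- one line of B's single pass: record the first explanation seen for each route key
def pvParseLine (found : PySem.Dict String String) (line : String) : PySem.Dict String String :=
  let s := PySem.Str.strip line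
  if PySem.Str.startswith s "Route " then
    let rest := PySem.Str.slice s (some 6) none
    let colon := PySem.Str.find rest ":"
    if colon ≠ -1 then
      let key := PySem.Str.slice rest none (some colon)
      if found.contains key then found
      else found.insert key (PySem.Str.strip (PySem.Str.slice rest (some (colon + 1)) none))
    else found
  else found

def parse_llm_explanations_alt (llm_response : String) (num_routes : Int) : List String :=
  let found := ((PySem.Str.split? (PySem.Str.strip llm_response) "\n").getD []).foldl pvParseLine PySem.Dict.empty
  (PySem.List.pyRange 1 (num_routes + 1) 1).foldl
    (fun acc i =>
      acc ++ [match found.get? (PySem.Int.toStr i) with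
        | some s => if s = "" then (if i = 1 then "Recommended route with lowest crowdedness." else "Alternative route option.") else s
        | none => if i = 1 then "Recommended route with lowest crowdedness." else "Alternative route option."]) []

-- ===== PRECONDITION & SPEC =====
def Spec_parse_llm_explanations (llm_response : String) (num_routes : Int) (out : List String) : Prop := out = parse_llm_explanations_alt llm_response num_routes
instance (llm_response : String) (num_routes : Int) (out : List String) : Decidable (Spec_parse_llm_explanations llm_response num_routes out) := by unfold Spec_parse_llm_explanations; infer_instance

-- ===== CLAIM (what is proved, stated in full; the proofs are below) =====
def Claim_equal_parse_llm_explanations : Prop := ∀ (llm_response : String) (num_routes : Int), Dom_parse_llm_explanations llm_response num_routes → Spec_parse_llm_explanations llm_response num_routes (parse_llm_explanations llm_response num_routes)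

-- ===== LEMMAS AND PROOFS =====

-- proof-side helpers
def pvMlineA (pat : String) (line : String) : Option String :=
  if PySem.Str.startswith (PySem.Str.strip line) pat then
    some (PySem.Str.strip ((PySem.List.pyGet? ((PySem.Str.splitMax? line pat 1).getD []) 1).getD ""))
  else none

def pvHit (line : String) : Option (String × String) :=
  let s := PySem.Str.strip line
  if PySem.Str.startswith s "Route " then
    let rest := PySem.Str.slice s (some 6) none
    let colon := PySem.Str.find rest ":"
    if colon ≠ -1 then
      some (PySem.Str.slice rest none (some colon),
            PySem.Str.strip (PySem.Str.slice rest (some (colon + 1)) none))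
    else none
  else none

def pvHitAt (k : String) (line : String) : Option String :=
  match pvHit line with
  | some (k', v) => if k' = k then some v else none
  | none => none


theorem pv_digitChar_ne_colon (n : Nat) (h : n < 10) : Nat.digitChar n ≠ ':' := by
  interval_cases n <;> decide

theorem pv_toDigitsCore_ne_colon : ∀ (f n : Nat) (l : List Char), (∀ c ∈ l, c ≠ ':') →
    ∀ c ∈ Nat.toDigitsCore 10 f n l, c ≠ ':' := by
  intro f
  induction f with
  | zero => intro n l hl; simpa [Nat.toDigitsCore] using hl
  | succ f ih =>
    intro n l hl c hc
    simp only [Nat.toDigitsCore] at hc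
    by_cases h0 : n / 10 = 0
    · rw [if_pos h0] at hc
      rcases List.mem_cons.mp hc with h | h
      · subst h; exact pv_digitChar_ne_colon _ (Nat.mod_lt _ (by norm_num))
      · exact hl c h
    · rw [if_neg h0] at hc
      refine ih (n / 10) _ ?_ c hc
      intro c' hc'
      rcases List.mem_cons.mp hc' with h | h
      · subst h; exact pv_digitChar_ne_colon _ (Nat.mod_lt _ (by norm_num))
      · exact hl c' h

theorem pv_toChars_ne_colon (i : Int) (hi : 1 ≤ i) : ∀ c ∈ PySem.Int.toChars i, c ≠ ':' := by
  unfold PySem.Int.toChars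
  rw [if_neg (by omega)]
  exact pv_toDigitsCore_ne_colon _ _ [] (by simp)

theorem pv_strip_decomp (cs : List Char) : ∃ w w', cs = w ++ PySem.Chars.strip cs ++ w' ∧
    (∀ c ∈ w, PySem.Chars.isspace c) ∧ (∀ c ∈ w', PySem.Chars.isspace c) := by
  refine ⟨cs.takeWhile PySem.Chars.isspace,
    ((cs.dropWhile PySem.Chars.isspace).reverse.takeWhile PySem.Chars.isspace).reverse, ?_, ?_, ?_⟩
  · have h2 : cs.dropWhile PySem.Chars.isspace =
        PySem.Chars.strip cs ++
          ((cs.dropWhile PySem.Chars.isspace).reverse.takeWhile PySem.Chars.isspace).reverse := by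
      unfold PySem.Chars.strip PySem.Chars.lstrip PySem.Chars.rstrip
      conv_lhs => rw [← List.reverse_reverse (cs.dropWhile PySem.Chars.isspace),
        ← List.takeWhile_append_dropWhile (p := PySem.Chars.isspace)
          (l := (cs.dropWhile PySem.Chars.isspace).reverse)]
      rw [List.reverse_append]
    conv_lhs => rw [← List.takeWhile_append_dropWhile (p := PySem.Chars.isspace) (l := cs), h2]
    rw [List.append_assoc]
  · intro c hc; exact List.mem_takeWhile_imp hc
  · intro c hc; rw [List.mem_reverse] at hc; exact List.mem_takeWhile_imp hc

theorem pv_rstrip_append (x w' : List Char) (h : ∀ c ∈ w', PySem.Chars.isspace c) :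
    PySem.Chars.rstrip (x ++ w') = PySem.Chars.rstrip x := by
  unfold PySem.Chars.rstrip
  rw [List.reverse_append, List.dropWhile_append]
  rw [List.dropWhile_eq_nil_iff.mpr (by intro c hc; rw [List.mem_reverse] at hc; exact h c hc)]
  simp

theorem pv_strip_append (x w' : List Char) (h : ∀ c ∈ w', PySem.Chars.isspace c) :
    PySem.Chars.strip (x ++ w') = PySem.Chars.strip x := by
  unfold PySem.Chars.strip PySem.Chars.lstrip
  rw [List.dropWhile_append]
  by_cases hx : (x.dropWhile PySem.Chars.isspace).isEmpty
  · rw [if_pos hx]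
    rw [List.dropWhile_eq_nil_iff.mpr h]
    rw [List.isEmpty_iff.mp hx]
  · rw [if_neg hx]
    exact pv_rstrip_append _ _ h

theorem pv_find_go_colon : ∀ (n t : List Char) (k : Nat), (∀ c ∈ n, c ≠ ':') →
    PySem.Chars.find.go [':'] (n ++ ':' :: t) k = (k : Int) + n.length := by
  intro n
  induction n with
  | nil =>
    intro t k _
    simp [PySem.Chars.find.go, List.isPrefixOf]
  | cons c n ih =>
    intro t k h
    have hc : c ≠ ':' := h c (by simp)
    simp only [List.cons_append, PySem.Chars.find.go]
    rw [if_neg (by simp [List.isPrefixOf]; intro hcc; exact absurd hcc.symm hc)]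
    rw [ih t (k + 1) (fun c' hc' => h c' (by simp [hc']))]
    simp only [List.length_cons]; push_cast; ring

theorem pv_find_colon (n t : List Char) (h : ∀ c ∈ n, c ≠ ':') :
    PySem.Chars.find (n ++ ':' :: t) [':'] = (n.length : Int) := by
  unfold PySem.Chars.find
  rw [pv_find_go_colon n t 0 h]; simp

theorem pv_go_zero (sep : List Char) : ∀ (fuel : Nat) (l cur : List Char) (acc : List (List Char)),
    PySem.Chars.splitOnMax.go sep fuel 0 l cur acc = ((cur.reverse ++ l) :: acc).reverse := by
  intro fuel l cur acc
  cases fuel with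
  | zero => simp [PySem.Chars.splitOnMax.go]
  | succ f =>
    cases l with
    | nil => simp [PySem.Chars.splitOnMax.go]
    | cons c rest => simp [PySem.Chars.splitOnMax.go]

theorem pv_go_one (sep : List Char) (hsep : sep ≠ []) : ∀ (k fuel : Nat) (l cur : List Char) (acc : List (List Char)),
    l.length < fuel → sep <+: l.drop k → (∀ j < k, ¬ sep <+: l.drop j) →
    PySem.Chars.splitOnMax.go sep fuel 1 l cur acc =
      acc.reverse ++ [cur.reverse ++ l.take k, l.drop (k + sep.length)] := by
  intro k
  induction k with
  | zero =>
    intro fuel l cur acc hfuel hk _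
    rw [List.drop_zero] at hk
    rcases l with _ | ⟨c, rest⟩
    · exact absurd (List.prefix_nil.mp hk) hsep
    rcases fuel with _ | f
    · omega
    simp only [PySem.Chars.splitOnMax.go]
    rw [if_neg (by norm_num), if_pos (List.isPrefixOf_iff_prefix.mpr hk)]
    rw [pv_go_zero]
    simp
  | succ k ih =>
    intro fuel l cur acc hfuel hk hmin
    rcases l with _ | ⟨c, rest⟩
    · rw [List.drop_nil] at hk; exact absurd (List.prefix_nil.mp hk) hsep
    rcases fuel with _ | f
    · omega
    have hnp : ¬ sep <+: (c :: rest) := by simpa using hmin 0 (Nat.succ_pos k)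
    simp only [PySem.Chars.splitOnMax.go]
    rw [if_neg (by norm_num), if_neg (fun hp => hnp (List.isPrefixOf_iff_prefix.mp hp))]
    rw [ih f rest (c :: cur) acc (by simp at hfuel; omega) (by simpa using hk)
      (fun j hj => by simpa using hmin (j+1) (Nat.succ_lt_succ hj))]
    simp only [List.reverse_cons, List.take_succ_cons, List.append_assoc,
      show k + 1 + sep.length = (k + sep.length) + 1 from by omega, List.drop_succ_cons]
    simp

theorem pv_splitA (lcs pat p' : List Char) (hpat : pat = 'R' :: p')
    (hpre : pat <+: PySem.Chars.strip lcs) :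
    ∃ x w', (∀ c ∈ w', PySem.Chars.isspace c) ∧
      PySem.Chars.splitOnMax lcs pat 1 = [x, (PySem.Chars.strip lcs).drop pat.length ++ w'] := by
  obtain ⟨w, w', hdec, hw, hw'⟩ := pv_strip_decomp lcs
  have hdec' : lcs = w ++ (PySem.Chars.strip lcs ++ w') := by
    conv_lhs => rw [hdec, List.append_assoc]
  refine ⟨lcs.take w.length, w', hw', ?_⟩
  unfold PySem.Chars.splitOnMax
  rw [if_neg (by norm_num)]
  have hdropw : lcs.drop w.length = PySem.Chars.strip lcs ++ w' := by
    conv_lhs => rw [hdec']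
    exact List.drop_left
  have hocc : pat <+: lcs.drop w.length := by
    rw [hdropw]; exact hpre.trans (List.prefix_append _ _)
  have hmin : ∀ j < w.length, ¬ pat <+: lcs.drop j := by
    intro j hj hp
    obtain ⟨t, ht⟩ := hp
    have h1 : lcs[j]? = some 'R' := by
      have h0 := List.getElem?_drop (xs := lcs) (i := j) (j := 0)
      rw [← ht, hpat] at h0
      simpa using h0.symm
    have h2 : lcs[j]? = w[j]? := by
      conv_lhs => rw [hdec']
      exact List.getElem?_append_left hj
    have h3 : 'R' ∈ w := by
      rw [h2] at h1
      exact List.mem_of_getElem? h1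
    have := hw 'R' h3
    simp [PySem.Chars.isspace] at this
  have hone : (1 : Int).toNat = 1 := rfl
  rw [hone, pv_go_one pat (by simp [hpat]) w.length _ _ _ _ (Nat.lt_succ_self _) hocc hmin]
  obtain ⟨r, hr⟩ := hpre
  have hdrop2 : lcs.drop (w.length + pat.length) = (PySem.Chars.strip lcs).drop pat.length ++ w' := by
    rw [← List.drop_drop, hdropw, ← hr, List.append_assoc, List.drop_left,
      List.drop_left]
  rw [hdrop2]
  simp

theorem pv_strip_ofList (y : List Char) :
    PySem.Str.strip (String.ofList y) = String.ofList (PySem.Chars.strip y) := by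
  unfold PySem.Str.strip
  rw [String.toList_ofList]

theorem pv_line (i : Int) (hi : 1 ≤ i) (l : String) :
    pvMlineA ("Route " ++ PySem.Int.toStr i ++ ":") l = pvHitAt (PySem.Int.toStr i) l := by
  have hn_col := pv_toChars_ne_colon i hi
  have hpatL : ("Route " ++ PySem.Int.toStr i ++ ":").toList
      = "Route ".toList ++ PySem.Int.toChars i ++ [':'] := by
    rw [String.toList_append, String.toList_append, PySem.Int.toList_toStr]
    rfl
  have h6 : ("Route ".toList).length = 6 := by decide
  by_cases hA : ("Route ".toList ++ PySem.Int.toChars i ++ [':']) <+: PySem.Chars.strip l.toList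
  · -- the line matches "Route {i}:"
    obtain ⟨t, ht⟩ := hA
    have hstrip : PySem.Chars.strip l.toList
        = ("Route ".toList ++ PySem.Int.toChars i ++ [':']) ++ t := ht.symm
    have hassoc : ("Route ".toList ++ PySem.Int.toChars i ++ [':']) ++ t
        = "Route ".toList ++ (PySem.Int.toChars i ++ ':' :: t) := by simp
    -- B side
    have hrest : PySem.Str.slice (PySem.Str.strip l) (some 6) none
        = String.ofList (PySem.Int.toChars i ++ ':' :: t) := by
      unfold PySem.Str.slice
      rw [PySem.Str.toList_strip, hstrip, hassoc, PySem.Chars.slice_eq_listSlice,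
        PySem.List.slice_from _ (show (0:Int) ≤ 6 from by norm_num)]
      rw [show ((6 : Int).toNat) = 6 from rfl, ← h6, List.drop_left]
    have hfind : PySem.Str.find (PySem.Str.slice (PySem.Str.strip l) (some 6) none) ":"
        = ((PySem.Int.toChars i).length : Int) := by
      unfold PySem.Str.find
      rw [hrest, String.toList_ofList, show (":" : String).toList = [':'] from by decide]
      exact pv_find_colon _ _ hn_col
    have hkey : PySem.Str.slice (PySem.Str.slice (PySem.Str.strip l) (some 6) none) none
        (some ((PySem.Int.toChars i).length : Int)) = PySem.Int.toStr i := by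
      rw [hrest]
      unfold PySem.Str.slice
      rw [String.toList_ofList, PySem.Chars.slice_eq_listSlice,
        PySem.List.slice_to _ (Int.natCast_nonneg _), Int.toNat_natCast, List.take_left]
      rfl
    have hval : PySem.Str.strip (PySem.Str.slice (PySem.Str.slice (PySem.Str.strip l) (some 6) none)
        (some (((PySem.Int.toChars i).length : Int) + 1)) none) = String.ofList (PySem.Chars.strip t) := by
      rw [hrest]
      unfold PySem.Str.slice
      rw [String.toList_ofList, PySem.Chars.slice_eq_listSlice,
        PySem.List.slice_from _ (show (0:Int) ≤ ((PySem.Int.toChars i).length : Int) + 1 from by omega),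
        show (((PySem.Int.toChars i).length : Int) + 1).toNat = (PySem.Int.toChars i).length + 1 from by omega,
        show (PySem.Int.toChars i) ++ ':' :: t = ((PySem.Int.toChars i) ++ [':']) ++ t from by simp,
        List.drop_left' (by simp)]
      exact pv_strip_ofList t
    have hHit : pvHit l = some (PySem.Int.toStr i, String.ofList (PySem.Chars.strip t)) := by
      simp only [pvHit]
      rw [if_pos (show PySem.Str.startswith (PySem.Str.strip l) "Route " = true from by
        rw [PySem.Str.startswith_eq, PySem.Str.toList_strip]
        exact (PySem.Chars.startswith_iff _ _).mpr
          (by rw [hstrip, hassoc, show ("Route " : String).toList = "Route ".toList from rfl]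
              exact List.prefix_append _ _))]
      rw [hfind]
      rw [if_pos (show ((PySem.Int.toChars i).length : Int) ≠ -1 from by omega)]
      rw [hkey, hval]
    -- A side
    have hcond : PySem.Str.startswith (PySem.Str.strip l)
        ("Route " ++ PySem.Int.toStr i ++ ":") = true := by
      rw [PySem.Str.startswith_eq, PySem.Str.toList_strip, hpatL]
      exact (PySem.Chars.startswith_iff _ _).mpr ⟨t, ht⟩
    obtain ⟨x, w', hw', hsp⟩ := pv_splitA l.toList ("Route " ++ PySem.Int.toStr i ++ ":").toList
      ("oute ".toList ++ PySem.Int.toChars i ++ [':'])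
      (by rw [hpatL]; rfl)
      (by rw [hpatL]; exact ⟨t, ht⟩)
    have hsplit1 : PySem.Str.splitMax? l ("Route " ++ PySem.Int.toStr i ++ ":") 1
        = some [String.ofList x,
            String.ofList ((PySem.Chars.strip l.toList).drop
              ("Route " ++ PySem.Int.toStr i ++ ":").toList.length ++ w')] := by
      unfold PySem.Str.splitMax? PySem.Chars.splitMax?
      rw [if_neg (show ¬(("Route " ++ PySem.Int.toStr i ++ ":").toList.isEmpty = true) from by
        rw [hpatL]; simp)]
      rw [hsp]
      rfl
    have hdropA : (PySem.Chars.strip l.toList).drop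
        ("Route " ++ PySem.Int.toStr i ++ ":").toList.length ++ w' = t ++ w' := by
      rw [hstrip, List.drop_left' (by rw [hpatL])]
    simp only [pvMlineA, pvHitAt, hHit, hcond, if_true, hsplit1, Option.getD_some]
    rw [hdropA, show (1 : Int) = ((1 : Nat) : Int) from rfl, PySem.List.pyGet?_natCast]
    simp only [List.getElem?_cons_succ, List.getElem?_cons_zero, Option.getD_some]
    rw [pv_strip_ofList, pv_strip_append t w' hw']
  · -- the line does not match "Route {i}:"
    have hcondF : ¬ (PySem.Str.startswith (PySem.Str.strip l)
        ("Route " ++ PySem.Int.toStr i ++ ":") = true) := by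
      rw [PySem.Str.startswith_eq, PySem.Str.toList_strip, hpatL]
      intro hc
      exact hA ((PySem.Chars.startswith_iff _ _).mp hc)
    rw [pvMlineA, if_neg hcondF]
    unfold pvHitAt
    by_cases c1 : PySem.Str.startswith (PySem.Str.strip l) "Route " = true
    · by_cases c2 : PySem.Str.find (PySem.Str.slice (PySem.Str.strip l) (some 6) none) ":" ≠ -1
      · -- the line is a "Route <something-else>:" line: its key cannot be str(i)
        obtain ⟨u, hu⟩ : "Route ".toList <+: PySem.Chars.strip l.toList := by
          rw [PySem.Str.startswith_eq, PySem.Str.toList_strip] at c1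
          exact (PySem.Chars.startswith_iff _ _).mp
            (by rw [show ("Route " : String).toList = "Route ".toList from rfl] at c1; exact c1)
        have hstrip2 : PySem.Chars.strip l.toList = "Route ".toList ++ u := hu.symm
        have hrest2 : PySem.Str.slice (PySem.Str.strip l) (some 6) none = String.ofList u := by
          unfold PySem.Str.slice
          rw [PySem.Str.toList_strip, hstrip2, PySem.Chars.slice_eq_listSlice,
            PySem.List.slice_from _ (show (0:Int) ≤ 6 from by norm_num),
            show ((6 : Int).toNat) = 6 from rfl, ← h6, List.drop_left]
        have hfind2 : PySem.Str.find (PySem.Str.slice (PySem.Str.strip l) (some 6) none) ":"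
            = PySem.Chars.find u [':'] := by
          unfold PySem.Str.find
          rw [hrest2, String.toList_ofList, show (":" : String).toList = [':'] from by decide]
        rw [hfind2] at c2
        have hpos : 0 ≤ PySem.Chars.find u [':'] := by
          have := PySem.Chars.neg_one_le_find (s := u) (sub := [':'])
          omega
        obtain ⟨hocc, -⟩ := PySem.Chars.find_spec hpos
        obtain ⟨t2, ht2⟩ := hocc
        have hkeyne : PySem.Str.slice (PySem.Str.slice (PySem.Str.strip l) (some 6) none) none
            (some (PySem.Str.find (PySem.Str.slice (PySem.Str.strip l) (some 6) none) ":"))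
            ≠ PySem.Int.toStr i := by
          rw [hfind2, hrest2]
          unfold PySem.Str.slice
          intro hk
          have hklist : PySem.List.slice u none (some (PySem.Chars.find u [':']))
              = PySem.Int.toChars i := by
            have := congrArg String.toList hk
            simp only [String.toList_ofList, PySem.Chars.slice_eq_listSlice,
              PySem.Int.toList_toStr] at this
            exact this
          rw [PySem.List.slice_to _ hpos] at hklist
          apply hA
          refine ⟨t2, ?_⟩
          have hu2 : u = PySem.Int.toChars i ++ ':' :: t2 := by
            conv_lhs => rw [← List.take_append_drop (PySem.Chars.find u [':']).toNat u]
            rw [hklist, ← ht2]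
            simp
          rw [hstrip2, hu2]
          simp
        have hHit : pvHit l = some (PySem.Str.slice (PySem.Str.slice (PySem.Str.strip l) (some 6) none) none
              (some (PySem.Str.find (PySem.Str.slice (PySem.Str.strip l) (some 6) none) ":")),
            PySem.Str.strip (PySem.Str.slice (PySem.Str.slice (PySem.Str.strip l) (some 6) none)
              (some (PySem.Str.find (PySem.Str.slice (PySem.Str.strip l) (some 6) none) ":" + 1)) none)) := by
          simp only [pvHit]
          rw [if_pos c1, if_pos (by rw [hfind2]; exact c2)]
        rw [hHit]
        simp only []
        rw [if_neg hkeyne]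
      · have hHit : pvHit l = none := by
          simp only [pvHit]
          rw [if_pos c1, if_neg c2]
        rw [hHit]
    · have hHit : pvHit l = none := by
        simp only [pvHit]
        rw [if_neg c1]
      rw [hHit]

theorem pv_scan_eq_findSome? (lines : List String) (pat : String) :
    pvScanA lines pat = lines.findSome? (pvMlineA pat) := by
  induction lines with
  | nil => simp [pvScanA]
  | cons l ls ih =>
    simp only [pvScanA, List.findSome?_cons, pvMlineA]
    by_cases h : PySem.Chars.startswith (PySem.Chars.strip l.toList) pat.toList = true <;>
      simp [h, ih]

theorem pv_parseLine_get? (d : PySem.Dict String String) (l : String) (k : String) :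
    (pvParseLine d l).get? k = (d.get? k).or (pvHitAt k l) := by
  simp only [pvParseLine, pvHitAt, pvHit]
  split_ifs with h1 h2 h3 <;> try simp
  · -- found line, key already present
    simp at h3
    split_ifs with hk
    · rw [← hk]
      have h3' := h3
      rw [PySem.Dict.contains_eq_isSome_get?] at h3'
      obtain ⟨w, hw⟩ := Option.isSome_iff_exists.mp h3'
      simp [hw]
    · simp
  · -- found line, fresh key: first occurrence is recorded
    simp at h3
    split_ifs with hk
    · rw [← hk]
      have h3' := h3
      rw [PySem.Dict.contains_eq_isSome_get?] at h3'
      simp at h3'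
      rw [PySem.Dict.get?_insert_self, h3']
      simp
    · rw [PySem.Dict.get?_insert_of_ne d _ (fun he => hk he.symm)]
      simp

theorem pv_fold_get? : ∀ (lines : List String) (d : PySem.Dict String String) (k : String),
    (lines.foldl pvParseLine d).get? k = (d.get? k).or (lines.findSome? (pvHitAt k)) := by
  intro lines
  induction lines with
  | nil => intro d k; simp
  | cons l ls ih =>
    intro d k
    rw [List.foldl_cons, ih, pv_parseLine_get?, List.findSome?_cons]
    cases h : pvHitAt k l <;> simp

-- ===== VERDICT (by name: the statement is the Claim_ definition above) =====
theorem parse_llm_explanations_spec : Claim_equal_parse_llm_explanations := by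
  intro llm_response num_routes _
  unfold Spec_parse_llm_explanations
  simp only [parse_llm_explanations, parse_llm_explanations_alt,
    PySem.List.foldl_append_singleton_eq_map, List.nil_append]
  apply List.map_congr_left
  intro i hi
  have h1 : 1 ≤ i := (PySem.List.mem_pyRange_one.mp hi).1
  rw [pv_scan_eq_findSome?, pv_fold_get?, PySem.Dict.get?_empty, Option.none_or,
    congrArg (fun f => List.findSome? f ((PySem.Str.split? (PySem.Str.strip llm_response) "\n").getD []))
      (funext (fun l => pv_line i h1 l))]
  cases List.findSome? (pvHitAt (PySem.Int.toStr i))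
      ((PySem.Str.split? (PySem.Str.strip llm_response) "\n").getD []) <;> rfl
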